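-- pv_equiv track=rewrite | github.com/redlolgeerf/hackerrank | generate_field.py | draw_field
-- ===== SOURCE A (Python) =====
-- def draw_field(field_size, r, c, targets):
--     field = ''
--
--     for y in range(field_size):
--         for x in range(field_size):
--             if x == 0:
--                 field += '\n'
--             square = '-'
--             if (x, y) == (r, c):
--                 square = 'b'
--             if (x, y) in targets:
--                 square = 'd'
--             field += square
--
--     field = str(field_size) + '\n' + str(r) + ' ' + str(c) + field
--     return field
-- ===== SOURCE B (Python) =====
-- def draw_field(field_size, r, c, targets):
--     # Scatter marks into a grid instead of testing every cell.
--     grid = [['-'] * field_size for _ in range(field_size)]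
--     if 0 <= r < field_size and 0 <= c < field_size:
--         grid[c][r] = 'b'
--     for tx, ty in targets:
--         if 0 <= tx < field_size and 0 <= ty < field_size:
--             grid[ty][tx] = 'd'
--     body = ''.join('\n' + ''.join(row) for row in grid)
--     return str(field_size) + '\n' + str(r) + ' ' + str(c) + body
-- ===== Notes on version B (the rewrite author's own statement) =====
-- stated objective: faster
-- what changed: B scatters the bomb and the bounds-checked targets into a pre-built grid of '-' rows and joins them, instead of A's nested scan that tests every cell against the bomb coordinates and the whole target list and grows the string by repeated concatenation.
import Mathlib
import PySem

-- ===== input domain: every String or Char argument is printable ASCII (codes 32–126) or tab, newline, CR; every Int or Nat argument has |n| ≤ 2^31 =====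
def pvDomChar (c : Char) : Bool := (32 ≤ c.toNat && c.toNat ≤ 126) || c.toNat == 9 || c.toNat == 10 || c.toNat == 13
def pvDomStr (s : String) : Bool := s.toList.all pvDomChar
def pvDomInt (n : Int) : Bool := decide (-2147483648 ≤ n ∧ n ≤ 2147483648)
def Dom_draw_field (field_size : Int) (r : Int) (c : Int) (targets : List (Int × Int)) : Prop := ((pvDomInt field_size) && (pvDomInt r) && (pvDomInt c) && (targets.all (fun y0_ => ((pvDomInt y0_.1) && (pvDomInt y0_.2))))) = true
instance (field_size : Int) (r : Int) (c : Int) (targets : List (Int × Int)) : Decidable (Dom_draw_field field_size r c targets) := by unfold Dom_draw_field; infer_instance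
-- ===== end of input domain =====

-- B scatters the bomb and target marks into a pre-built '-' grid instead of testing every
-- cell against the bomb and the target list (objective: faster; measured).

-- ===== PORT A =====
def draw_field (field_size : Int) (r : Int) (c : Int) (targets : List (Int × Int)) : String :=
  let field : String :=
    (PySem.List.pyRange 0 field_size 1).foldl (fun field y =>
      (PySem.List.pyRange 0 field_size 1).foldl (fun field x =>
        let field := if x == 0 then field ++ "\n" else field
        let square := "-"
        let square := if (x, y) == (r, c) then "b" else square
        let square := if targets.contains (x, y) then "d" else square
        field ++ square) field) ""
  PySem.Int.toStr field_size ++ "\n" ++ PySem.Int.toStr r ++ " " ++ PySem.Int.toStr c ++ field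

-- ===== PORT B =====
def draw_field_alt (field_size : Int) (r : Int) (c : Int) (targets : List (Int × Int)) : String :=
  let n := field_size.toNat
  let grid : List (List Char) := List.replicate n (List.replicate n '-')
  let grid := if 0 ≤ r ∧ r < field_size ∧ 0 ≤ c ∧ c < field_size
              then grid.modify c.toNat (fun row => row.set r.toNat 'b') else grid
  let grid := targets.foldl (fun g t =>
    if 0 ≤ t.1 ∧ t.1 < field_size ∧ 0 ≤ t.2 ∧ t.2 < field_size
    then g.modify t.2.toNat (fun row => row.set t.1.toNat 'd') else g) grid
  let body := grid.foldl (fun acc row => acc ++ ("\n" ++ String.ofList row)) ""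
  PySem.Int.toStr field_size ++ "\n" ++ PySem.Int.toStr r ++ " " ++ PySem.Int.toStr c ++ body

-- ===== PRECONDITION & SPEC =====
def Spec_draw_field (field_size : Int) (r : Int) (c : Int) (targets : List (Int × Int)) (out : String) : Prop := out = draw_field_alt field_size r c targets
instance (field_size : Int) (r : Int) (c : Int) (targets : List (Int × Int)) (out : String) : Decidable (Spec_draw_field field_size r c targets out) := by unfold Spec_draw_field; infer_instance

-- ===== CLAIM (what is proved, stated in full; the proofs are below) =====
def Claim_equal_draw_field : Prop := ∀ (field_size : Int) (r : Int) (c : Int) (targets : List (Int × Int)), Dom_draw_field field_size r c targets → Spec_draw_field field_size r c targets (draw_field field_size r c targets)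

-- ===== LEMMAS AND PROOFS =====

-- the character both programs end up putting at cell (x, y)
def cellCh (r c : Int) (targets : List (Int × Int)) (x y : Int) : Char :=
  if targets.contains (x, y) then 'd' else if (x, y) = (r, c) then 'b' else '-'

-- the one-character string A appends at cell (x, y)
def cellStr (r c : Int) (targets : List (Int × Int)) (x y : Int) : String :=
  if targets.contains (x, y) then "d" else if (x, y) == (r, c) then "b" else "-"

theorem cellStr_toList (r c : Int) (targets : List (Int × Int)) (x y : Int) :
    (cellStr r c targets x y).toList = [cellCh r c targets x y] := by
  unfold cellStr cellCh
  split_ifs with h1 h2 h3 h4 <;> simp_all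

theorem str_ext {s t : String} (h : s.toList = t.toList) : s = t := by
  have := congrArg String.ofList h; simpa using this

theorem nl_toList : ("\n" : String).toList = ['\n'] := by decide

-- a fold that appends h x for each x produces the concatenation of all h x
theorem strFoldl_append {α : Type} (h : α → String) (l : List α) (s : String) :
    l.foldl (fun acc x => acc ++ h x) s
      = s ++ String.ofList (l.flatMap (fun x => (h x).toList)) := by
  induction l generalizing s with
  | nil => simp
  | cons a t ih =>
      simp only [List.foldl_cons, List.flatMap_cons]
      rw [ih]
      simp [String.append_assoc]

theorem strFoldl_single {α : Type} (f : α → Char) (h : α → String)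
    (hh : ∀ x, (h x).toList = [f x]) (l : List α) (s : String) :
    l.foldl (fun acc x => acc ++ h x) s = s ++ String.ofList (l.map f) := by
  rw [strFoldl_append]
  have key : l.flatMap (fun x => (h x).toList) = l.map f := by
    induction l with
    | nil => simp
    | cons a t ih =>
        rw [List.flatMap_cons, hh a, ih, List.map_cons]
        simp
  rw [key]

theorem pyR (n : Int) :
    PySem.List.pyRange 0 n 1 = (List.range n.toNat).map (fun k : Nat => (k : Int)) := by
  apply List.ext_getElem
  · simp [PySem.List.length_pyRange_one]
  · intro i h1 h2
    rw [PySem.List.getElem_pyRange_one]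
    simp

-- setting inside a map-over-range (index in range)
theorem set_map_range {α : Type} (m : Nat) (f : Nat → α) (i : Nat) (a : α) (_hi : i < m) :
    ((List.range m).map f).set i a
      = (List.range m).map (fun k => if k = i then a else f k) := by
  apply List.ext_getElem
  · simp
  · intro j hj _
    simp only [List.length_set, List.length_map, List.length_range] at hj
    rw [List.getElem_set]
    by_cases h : i = j <;> simp [h, List.getElem_map, List.getElem_range]
    exact fun h' => absurd h'.symm h

theorem modify_map_range {α : Type} (m : Nat) (f : Nat → α) (i : Nat) (g : α → α) :
    ((List.range m).map f).modify i g
      = (List.range m).map (fun k => if k = i then g (f k) else f k) := by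
  apply List.ext_getElem
  · simp [List.length_modify]
  · intro j hj _
    simp only [List.length_modify, List.length_map, List.length_range] at hj
    rw [List.getElem_modify]
    by_cases h : i = j <;> simp [h, List.getElem_map, List.getElem_range]
    exact fun h' => absurd h'.symm h

-- the scatter loop of B over a grid in map-over-range form
theorem scatter_map (fs : Int) (m : Nat) (hm : m = fs.toNat) (ts : List (Int × Int))
    (F : Nat → Nat → Char) :
    ts.foldl (fun g t =>
        if 0 ≤ t.1 ∧ t.1 < fs ∧ 0 ≤ t.2 ∧ t.2 < fs
        then g.modify t.2.toNat (fun row => row.set t.1.toNat 'd') else g)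
      ((List.range m).map (fun j : Nat => (List.range m).map (fun i : Nat => F i j)))
    = (List.range m).map (fun j : Nat => (List.range m).map (fun i : Nat =>
        if ((i : Int), (j : Int)) ∈ ts.filter (fun t => decide (0 ≤ t.1 ∧ t.1 < fs ∧ 0 ≤ t.2 ∧ t.2 < fs))
        then 'd' else F i j)) := by
  induction ts generalizing F with
  | nil => simp
  | cons t ts ih =>
      simp only [List.foldl_cons]
      by_cases h : 0 ≤ t.1 ∧ t.1 < fs ∧ 0 ≤ t.2 ∧ t.2 < fs
      · rw [List.filter_cons_of_pos (by simpa using h), if_pos h, modify_map_range]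
        have hlt1 : t.1.toNat < m := by omega
        have hgrid : (List.range m).map (fun j : Nat => if j = t.2.toNat
              then ((List.range m).map (fun i : Nat => F i j)).set t.1.toNat 'd'
              else (List.range m).map (fun i : Nat => F i j))
            = (List.range m).map (fun j : Nat => (List.range m).map (fun i : Nat =>
                if j = t.2.toNat ∧ i = t.1.toNat then 'd' else F i j)) := by
          apply List.map_congr_left
          intro j _
          by_cases hjc : j = t.2.toNat
          · rw [if_pos hjc, set_map_range m _ _ _ hlt1]
            apply List.map_congr_left
            intro i _
            by_cases hic : i = t.1.toNat <;> simp [hic, hjc]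
          · rw [if_neg hjc]
            apply List.map_congr_left
            intro i _
            simp [hjc]
        rw [hgrid, ih]
        apply List.map_congr_left
        intro j hj
        apply List.map_congr_left
        intro i hi
        rw [List.mem_range] at hj hi
        by_cases hmem : ((i : Int), (j : Int)) ∈ ts.filter (fun t => decide (0 ≤ t.1 ∧ t.1 < fs ∧ 0 ≤ t.2 ∧ t.2 < fs))
        · rw [if_pos hmem, if_pos (List.mem_cons_of_mem t hmem)]
        · rw [if_neg hmem]
          by_cases heq : ((i : Int), (j : Int)) = t
          · have e1 : t.1 = (i : Int) := by rw [← heq]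
            have e2 : t.2 = (j : Int) := by rw [← heq]
            have hcond : j = t.2.toNat ∧ i = t.1.toNat := by constructor <;> omega
            rw [if_pos hcond, if_pos (by rw [List.mem_cons]; exact Or.inl heq)]
          · have hcond : ¬ (j = t.2.toNat ∧ i = t.1.toNat) := by
              intro hcc
              apply heq
              have e1 : t.1 = (i : Int) := by omega
              have e2 : t.2 = (j : Int) := by omega
              rw [Prod.ext_iff]
              exact ⟨e1.symm, e2.symm⟩
            rw [if_neg hcond, if_neg (by
              rw [List.mem_cons]
              rintro (h' | h')
              · exact heq h'
              · exact hmem h')]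
      · rw [List.filter_cons_of_neg (by simpa using h), if_neg h]
        exact ih F

-- the character B's bomb phase puts at cell (i, j)
def bombCh (fs r c : Int) (i j : Nat) : Char :=
  if 0 ≤ r ∧ r < fs ∧ 0 ≤ c ∧ c < fs ∧ i = r.toNat ∧ j = c.toNat then 'b' else '-'

theorem bomb_grid_eq (fs r c : Int) (m : Nat) (hm : m = fs.toNat) :
    (if 0 ≤ r ∧ r < fs ∧ 0 ≤ c ∧ c < fs
     then (List.replicate m (List.replicate m '-')).modify c.toNat (fun row => row.set r.toNat 'b')
     else List.replicate m (List.replicate m '-'))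
    = (List.range m).map (fun j : Nat => (List.range m).map (fun i : Nat => bombCh fs r c i j)) := by
  have hrep : List.replicate m (List.replicate m '-')
      = (List.range m).map (fun _ : Nat => (List.range m).map (fun _ : Nat => '-')) := by
    simp [List.map_const']
  by_cases h : 0 ≤ r ∧ r < fs ∧ 0 ≤ c ∧ c < fs
  · rw [if_pos h, hrep, modify_map_range]
    have hrlt : r.toNat < m := by omega
    apply List.map_congr_left
    intro j _
    by_cases hjc : j = c.toNat
    · rw [if_pos hjc, set_map_range m _ _ _ hrlt]
      apply List.map_congr_left
      intro i _
      by_cases hic : i = r.toNat <;> simp [bombCh, hic, hjc, h]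
    · rw [if_neg hjc]
      apply List.map_congr_left
      intro i _
      simp [bombCh, hjc]
  · rw [if_neg h, hrep]
    apply List.map_congr_left
    intro j _
    apply List.map_congr_left
    intro i _
    simp only [bombCh]
    rw [if_neg]
    intro hc
    exact h ⟨hc.1, hc.2.1, hc.2.2.1, hc.2.2.2.1⟩

-- B's final grid equals the cell-by-cell description
theorem grid_eq (fs r c : Int) (targets : List (Int × Int)) (m : Nat) (hm : m = fs.toNat) :
    (targets.foldl (fun g t =>
        if 0 ≤ t.1 ∧ t.1 < fs ∧ 0 ≤ t.2 ∧ t.2 < fs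
        then g.modify t.2.toNat (fun row => row.set t.1.toNat 'd') else g)
      (if 0 ≤ r ∧ r < fs ∧ 0 ≤ c ∧ c < fs
       then (List.replicate m (List.replicate m '-')).modify c.toNat (fun row => row.set r.toNat 'b')
       else List.replicate m (List.replicate m '-')))
    = (List.range m).map (fun j : Nat => (List.range m).map (fun i : Nat => cellCh r c targets (i : Int) (j : Int))) := by
  rw [bomb_grid_eq fs r c m hm, scatter_map fs m hm targets]
  apply List.map_congr_left
  intro j hj
  apply List.map_congr_left
  intro i hi
  rw [List.mem_range] at hj hi
  have e1 : (((i : Int), (j : Int)) ∈ targets.filter (fun t => decide (0 ≤ t.1 ∧ t.1 < fs ∧ 0 ≤ t.2 ∧ t.2 < fs)))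
      ↔ targets.contains ((i : Int), (j : Int)) = true := by
    rw [List.mem_filter, List.contains_iff_mem]
    constructor
    · exact fun hx => hx.1
    · intro hx
      refine ⟨hx, ?_⟩
      simp only [decide_eq_true_eq]
      refine ⟨by omega, by omega, by omega, by omega⟩
  have e2 : (0 ≤ r ∧ r < fs ∧ 0 ≤ c ∧ c < fs ∧ i = r.toNat ∧ j = c.toNat)
      ↔ (((i : Int), (j : Int)) = (r, c)) := by
    rw [Prod.mk.injEq]
    constructor
    · intro hx
      exact ⟨by omega, by omega⟩
    · intro hx
      refine ⟨by omega, by omega, by omega, by omega, by omega, by omega⟩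
  simp only [cellCh, bombCh, e1, e2]

-- A's inner loop from a positive start index appends one cell character per x
theorem innerTail (fs r c y a : Int) (targets : List (Int × Int)) (ha : 1 ≤ a) (s : String) :
    (PySem.List.pyRange a fs 1).foldl (fun field x =>
        (if x == 0 then field ++ "\n" else field) ++
          (if targets.contains (x, y) then "d" else if (x, y) == (r, c) then "b" else "-")) s
    = s ++ String.ofList ((PySem.List.pyRange a fs 1).map (fun x => cellCh r c targets x y)) := by
  rw [List.foldl_ext _ (fun acc x => acc ++ cellStr r c targets x y)]
  · exact strFoldl_single _ _ (fun x => cellStr_toList r c targets x y) _ s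
  · intro acc x hx
    rw [PySem.List.mem_pyRange_one] at hx
    have hx0 : (x == 0) = false := by simp; omega
    rw [hx0]
    simp [cellStr]

-- A's full inner loop (one row, with its leading newline), for 0 < fs
theorem innerFull (fs r c y : Int) (targets : List (Int × Int)) (hn : 0 < fs) (s : String) :
    (PySem.List.pyRange 0 fs 1).foldl (fun field x =>
        (if x == 0 then field ++ "\n" else field) ++
          (if targets.contains (x, y) then "d" else if (x, y) == (r, c) then "b" else "-")) s
    = s ++ String.ofList ('\n' :: (PySem.List.pyRange 0 fs 1).map (fun x => cellCh r c targets x y)) := by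
  conv_lhs => rw [PySem.List.pyRange_one_cons hn]
  conv_rhs => rw [PySem.List.pyRange_one_cons hn]
  simp only [List.foldl_cons, zero_add]
  have h0 : ((0 : Int) == 0) = true := by simp
  rw [h0]
  simp only [if_true]
  rw [show (if targets.contains ((0 : Int), y) then "d" else if (((0 : Int), y) == (r, c)) then "b" else "-")
        = cellStr r c targets 0 y from rfl]
  rw [innerTail fs r c y 1 targets le_rfl]
  apply str_ext
  simp [cellStr_toList, nl_toList, List.append_assoc]

-- A's whole double loop
theorem A_eq (fs r c : Int) (targets : List (Int × Int)) :
    (PySem.List.pyRange 0 fs 1).foldl (fun field y =>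
      (PySem.List.pyRange 0 fs 1).foldl (fun field x =>
        (if x == 0 then field ++ "\n" else field) ++
          (if targets.contains (x, y) then "d" else if (x, y) == (r, c) then "b" else "-")) field) ""
    = String.ofList ((PySem.List.pyRange 0 fs 1).flatMap (fun y =>
        '\n' :: (PySem.List.pyRange 0 fs 1).map (fun x => cellCh r c targets x y))) := by
  rw [List.foldl_ext _ (fun acc y => acc ++ String.ofList ('\n' :: (PySem.List.pyRange 0 fs 1).map (fun x => cellCh r c targets x y)))]
  · rw [strFoldl_append]
    apply str_ext
    simp
  · intro acc y hy
    rw [PySem.List.mem_pyRange_one] at hy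
    exact innerFull fs r c y targets (by omega) acc

-- ===== VERDICT (by name: the statement is the Claim_ definition above) =====
theorem draw_field_spec : Claim_equal_draw_field := by
  intro fs r c targets _
  unfold Spec_draw_field
  simp only [draw_field, draw_field_alt]
  rw [A_eq fs r c targets]
  rw [strFoldl_append]
  rw [grid_eq fs r c targets fs.toNat rfl]
  apply str_ext
  simp [pyR, List.flatMap_map, List.map_map, nl_toList, Function.comp_def]
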